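-- pv_equiv track=rewrite | github.com/BugTraceAI/BugTraceAI-CLI | bugtrace/agents/xss/dedup.py | merge_wet_metadata_into_dry
-- ===== SOURCE A (Python) =====
-- from typing import Callable, Dict, List, Optional, Tuple
--
-- def merge_wet_metadata_into_dry(
--     dry_list: List[Dict],
--     wet_findings: List[Dict],
-- ) -> List[Dict]:
--     """
--     Post-LLM merge: ensure deterministic fields are preserved.
--
--     LLM may drop metadata fields like http_method, param_source, etc.
--     This restores them from the original WET findings.
--
--     PURE function (returns the same list, mutated in place for efficiency).
--
--     Args:
--         dry_list: Deduplicated list from LLM.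
--         wet_findings: Original WET findings with full metadata.
--
--     Returns:
--         dry_list with metadata fields restored.
--     """
--     wet_meta_map = {}
--     for wf in wet_findings:
--         key = (wf.get("url", ""), wf.get("parameter", ""))
--         wet_meta_map[key] = {
--             "http_method": wf.get("http_method", "GET"),
--             "param_source": wf.get("param_source", ""),
--             "form_enctype": wf.get("form_enctype", ""),
--             "form_action": wf.get("form_action", ""),
--         }
--
--     for df in dry_list:
--         key = (df.get("url", ""), df.get("parameter", ""))
--         wet_meta = wet_meta_map.get(key, {})
--         if not df.get("http_method"):
--             df["http_method"] = wet_meta.get("http_method", "GET")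
--         if not df.get("param_source"):
--             df["param_source"] = wet_meta.get("param_source", "")
--         if not df.get("form_enctype"):
--             df["form_enctype"] = wet_meta.get("form_enctype", "")
--         if not df.get("form_action"):
--             df["form_action"] = wet_meta.get("form_action", "")
--
--     return dry_list
-- ===== SOURCE B (Python) =====
-- def merge_wet_metadata_into_dry(dry_list, wet_findings):
--     for df in dry_list:
--         key = (df.get("url", ""), df.get("parameter", ""))
--         match = None
--         for wf in wet_findings:
--             if (wf.get("url", ""), wf.get("parameter", "")) == key:
--                 match = wf
--         for field, default in (("http_method", "GET"),
--                                ("param_source", ""),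
--                                ("form_enctype", ""),
--                                ("form_action", "")):
--             if not df.get(field):
--                 df[field] = default if match is None else match.get(field, default)
--     return dry_list
-- ===== Notes on version B (the rewrite author's own statement) =====
-- stated objective: alternative
-- what changed: Replaced the precomputed (url,parameter)->metadata hash map with a direct last-match linear scan of wet_findings per dry finding, and the four copied if-blocks with a table-driven field loop.
import Mathlib
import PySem

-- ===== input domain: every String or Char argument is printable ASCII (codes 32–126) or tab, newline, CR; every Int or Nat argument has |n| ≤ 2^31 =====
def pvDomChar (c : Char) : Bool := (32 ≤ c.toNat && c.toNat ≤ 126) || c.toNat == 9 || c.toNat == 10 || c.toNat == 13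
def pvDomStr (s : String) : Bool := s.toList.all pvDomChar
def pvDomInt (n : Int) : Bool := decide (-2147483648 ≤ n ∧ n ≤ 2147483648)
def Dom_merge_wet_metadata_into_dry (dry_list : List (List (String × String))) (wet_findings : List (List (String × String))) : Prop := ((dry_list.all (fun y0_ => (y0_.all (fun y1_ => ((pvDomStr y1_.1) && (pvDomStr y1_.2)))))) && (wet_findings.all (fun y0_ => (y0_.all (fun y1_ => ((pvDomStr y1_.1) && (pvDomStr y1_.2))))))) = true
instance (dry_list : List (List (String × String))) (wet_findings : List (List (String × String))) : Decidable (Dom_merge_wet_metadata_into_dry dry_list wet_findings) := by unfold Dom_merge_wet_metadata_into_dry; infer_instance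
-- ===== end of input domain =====

-- B replaces A's precomputed (url,parameter)→metadata map with a direct last-match
-- scan of wet_findings per dry finding and a table-driven field loop (objective:
-- alternative). Python A and B both mutate the dicts of dry_list in place; the
-- equivalence proved here concerns the returned value.

-- dicts are association lists: get = first match, set = overwrite first match in place else append
def pvAget : List (String × String) → String → Option String
  | [], _ => none
  | p :: r, k => if p.1 == k then some p.2 else pvAget r k

def pvAset : List (String × String) → String → String → List (String × String)
  | [], k, v => [(k, v)]
  | p :: r, k, v => if p.1 == k then (k, v) :: r else p :: pvAset r k v

-- Python's 'not df.get(field)': true for a missing key (None) or empty string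
def pvFalsy (o : Option String) : Bool := (o.getD "") == ""

def pvKey (d : List (String × String)) : String × String :=
  ((pvAget d "url").getD "", (pvAget d "parameter").getD "")

-- ===== PORT A =====
def pvMetaOf (wf : List (String × String)) : List (String × String) :=
  [("http_method", (pvAget wf "http_method").getD "GET"),
   ("param_source", (pvAget wf "param_source").getD ""),
   ("form_enctype", (pvAget wf "form_enctype").getD ""),
   ("form_action", (pvAget wf "form_action").getD "")]

def pvFillA (df wet_meta : List (String × String)) : List (String × String) :=
  let df1 := if pvFalsy (pvAget df "http_method") then pvAset df "http_method" ((pvAget wet_meta "http_method").getD "GET") else df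
  let df2 := if pvFalsy (pvAget df1 "param_source") then pvAset df1 "param_source" ((pvAget wet_meta "param_source").getD "") else df1
  let df3 := if pvFalsy (pvAget df2 "form_enctype") then pvAset df2 "form_enctype" ((pvAget wet_meta "form_enctype").getD "") else df2
  if pvFalsy (pvAget df3 "form_action") then pvAset df3 "form_action" ((pvAget wet_meta "form_action").getD "") else df3

def merge_wet_metadata_into_dry (dry_list : List (List (String × String))) (wet_findings : List (List (String × String))) : List (List (String × String)) :=
  let wet_meta_map : PySem.Dict (String × String) (List (String × String)) :=
    wet_findings.foldl (fun m wf => m.insert (pvKey wf) (pvMetaOf wf)) PySem.Dict.empty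
  dry_list.map (fun df => pvFillA df ((wet_meta_map.get? (pvKey df)).getD []))

-- ===== PORT B =====
def pvFields : List (String × String) :=
  [("http_method", "GET"), ("param_source", ""), ("form_enctype", ""), ("form_action", "")]

def pvFillB (df : List (String × String)) (mtch : Option (List (String × String))) : List (String × String) :=
  pvFields.foldl (fun df fd =>
    if pvFalsy (pvAget df fd.1) then
      pvAset df fd.1 (match mtch with
        | none => fd.2
        | some wf => (pvAget wf fd.1).getD fd.2)
    else df) df

def merge_wet_metadata_into_dry_alt (dry_list : List (List (String × String))) (wet_findings : List (List (String × String))) : List (List (String × String)) :=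
  dry_list.map (fun df =>
    let key := pvKey df
    let mtch := wet_findings.foldl (fun acc wf => if pvKey wf == key then some wf else acc) none
    pvFillB df mtch)

-- ===== PRECONDITION & SPEC =====
def Spec_merge_wet_metadata_into_dry (dry_list : List (List (String × String))) (wet_findings : List (List (String × String))) (out : List (List (String × String))) : Prop := out = merge_wet_metadata_into_dry_alt dry_list wet_findings
instance (dry_list : List (List (String × String))) (wet_findings : List (List (String × String))) (out : List (List (String × String))) : Decidable (Spec_merge_wet_metadata_into_dry dry_list wet_findings out) := by unfold Spec_merge_wet_metadata_into_dry; infer_instance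

-- ===== CLAIM (what is proved, stated in full; the proofs are below) =====
def Claim_equal_merge_wet_metadata_into_dry : Prop := ∀ (dry_list : List (List (String × String))) (wet_findings : List (List (String × String))), Dom_merge_wet_metadata_into_dry dry_list wet_findings → Spec_merge_wet_metadata_into_dry dry_list wet_findings (merge_wet_metadata_into_dry dry_list wet_findings)

-- ===== LEMMAS AND PROOFS =====

-- the dict A builds answers with the metadata of the LAST wet finding whose key matches (B's scan)
theorem pv_get_foldl (k : String × String) :
    ∀ (ws : List (List (String × String))) (m : PySem.Dict (String × String) (List (String × String)))
      (acc : Option (List (String × String))),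
      m.get? k = acc.map pvMetaOf →
      ((ws.foldl (fun m wf => m.insert (pvKey wf) (pvMetaOf wf)) m).get? k)
        = (ws.foldl (fun acc wf => if pvKey wf == k then some wf else acc) acc).map pvMetaOf := by
  intro ws
  induction ws with
  | nil => intro m acc h; simpa using h
  | cons w ws ih =>
    intro m acc h
    simp only [List.foldl_cons]
    apply ih
    rw [PySem.Dict.get?_insert]
    by_cases hk : pvKey w = k
    · simp [hk]
    · simp [hk, Ne.symm hk, h]

-- filling from the stored 4-field metadata dict = filling straight from the matched wet finding
theorem pv_fill_eq (df : List (String × String)) (mtch : Option (List (String × String))) :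
    pvFillA df ((mtch.map pvMetaOf).getD []) = pvFillB df mtch := by
  cases mtch with
  | none => rfl
  | some wf =>
    simp [pvFillA, pvFillB, pvFields, pvMetaOf, pvAget, List.foldl]

-- ===== VERDICT (by name: the statement is the Claim_ definition above) =====
theorem merge_wet_metadata_into_dry_spec : Claim_equal_merge_wet_metadata_into_dry := by
  intro dry wet _
  unfold Spec_merge_wet_metadata_into_dry merge_wet_metadata_into_dry merge_wet_metadata_into_dry_alt
  apply List.map_congr_left
  intro df _
  rw [pv_get_foldl (pvKey df) wet PySem.Dict.empty none (by simp)]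
  exact pv_fill_eq df _
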